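-- pv_equiv track=rewrite | github.com/hertz-ai/HARTOS | security/hive_guardrails.py | prefer_green_node
-- ===== SOURCE A (Python) =====
-- def prefer_green_node(candidates: list,
--                       strategy: str = 'balanced') -> list:
--     """When multiple nodes can serve, prefer renewable-powered ones."""
--     if strategy == 'speed':
--         return candidates
--     green = [c for c in candidates
--              if c.get('energy_source') in ('solar', 'wind', 'hydro')]
--     non_green = [c for c in candidates if c not in green]
--     return green + non_green if green else candidates
-- ===== SOURCE B (Python) =====
-- def prefer_green_node(candidates: list,
--                       strategy: str = 'balanced') -> list:
--     """When multiple nodes can serve, prefer renewable-powered ones."""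
--     if strategy == 'speed':
--         return candidates
--     out = []
--     split = 0          # number of green nodes placed so far = insertion point
--     for c in candidates:
--         if c.get('energy_source') in ('solar', 'wind', 'hydro'):
--             out.insert(split, c)
--             split += 1
--         else:
--             out.append(c)
--     return out
-- ===== Notes on version B (the rewrite author's own statement) =====
-- stated objective: alternative
-- what changed: Replaced the two staged list comprehensions (the second rescanning the green list for membership) and the conditional concatenation by a single pass that maintains one output list and a split index, inserting each green node at the split and appending non-green nodes.
import Mathlib
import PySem

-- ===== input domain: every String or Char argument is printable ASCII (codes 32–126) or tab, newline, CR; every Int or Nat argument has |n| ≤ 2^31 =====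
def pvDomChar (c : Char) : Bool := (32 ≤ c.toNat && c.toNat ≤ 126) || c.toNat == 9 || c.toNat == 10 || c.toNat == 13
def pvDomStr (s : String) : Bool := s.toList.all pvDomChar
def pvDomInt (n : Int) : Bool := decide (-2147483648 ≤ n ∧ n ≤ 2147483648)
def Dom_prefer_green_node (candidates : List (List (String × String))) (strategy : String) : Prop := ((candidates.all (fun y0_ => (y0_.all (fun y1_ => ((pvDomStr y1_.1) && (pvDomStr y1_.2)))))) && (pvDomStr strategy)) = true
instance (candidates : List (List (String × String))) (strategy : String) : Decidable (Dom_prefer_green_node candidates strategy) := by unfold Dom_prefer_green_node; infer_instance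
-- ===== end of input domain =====

-- B replaces the two staged comprehensions (the second rescanning the green list for
-- membership) by ONE pass that list.insert's each green node at a moving split index
-- and appends the rest: a different single-pass algorithm with the same observable result.


-- ===== PORT A =====
-- c.get('energy_source') in ('solar', 'wind', 'hydro')
def pvIsGreen (c : List (String × String)) : Bool :=
  match PySem.Dict.get? ⟨c⟩ "energy_source" with
  | some v => v == "solar" || v == "wind" || v == "hydro"
  | none => false

def prefer_green_node (candidates : List (List (String × String))) (strategy : String) : List (List (String × String)) :=
  if strategy == "speed" then candidates
  else
    let green := candidates.filter (fun c => pvIsGreen c)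
    let non_green := candidates.filter (fun c => !green.contains c)
    if green.isEmpty then candidates else green ++ non_green

-- ===== PORT B =====
-- loop body: out.insert(split, c); split += 1  /  out.append(c)
def pvGreenStep (st : List (List (String × String)) × Int) (c : List (String × String)) :
    List (List (String × String)) × Int :=
  if decide (PySem.Dict.get? ⟨c⟩ "energy_source" ∈ [some "solar", some "wind", some "hydro"]) then
    (PySem.List.insert st.1 st.2 c, st.2 + 1)
  else
    (st.1 ++ [c], st.2)

def prefer_green_node_alt (candidates : List (List (String × String))) (strategy : String) : List (List (String × String)) :=
  if strategy == "speed" then candidates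
  else (candidates.foldl pvGreenStep ([], 0)).1

-- ===== PRECONDITION & SPEC =====
def Spec_prefer_green_node (candidates : List (List (String × String))) (strategy : String) (out : List (List (String × String))) : Prop := out = prefer_green_node_alt candidates strategy
instance (candidates : List (List (String × String))) (strategy : String) (out : List (List (String × String))) : Decidable (Spec_prefer_green_node candidates strategy out) := by unfold Spec_prefer_green_node; infer_instance

-- ===== CLAIM (what is proved, stated in full; the proofs are below) =====
def Claim_equal_prefer_green_node : Prop := ∀ (candidates : List (List (String × String))) (strategy : String), Dom_prefer_green_node candidates strategy → Spec_prefer_green_node candidates strategy (prefer_green_node candidates strategy)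

-- ===== LEMMAS AND PROOFS =====

-- B's membership test agrees with A's helper
theorem pvStep_test_eq (c : List (String × String)) :
    decide (PySem.Dict.get? ⟨c⟩ "energy_source" ∈ [some "solar", some "wind", some "hydro"]) = pvIsGreen c := by
  unfold pvIsGreen
  cases PySem.Dict.get? ⟨c⟩ "energy_source" with
  | none => simp
  | some v => by_cases h1 : v = "solar" <;> by_cases h2 : v = "wind" <;> by_cases h3 : v = "hydro" <;>
      simp [h1, h2, h3]

-- inserting at the split point of g ++ n lands between the blocks
theorem insert_split (g n : List (List (String × String))) (c : List (String × String)) :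
    PySem.List.insert (g ++ n) (g.length : Int) c = (g ++ [c]) ++ n := by
  rw [PySem.List.insert_natCast (g ++ n) g.length c (by simp)]
  simp

-- loop invariant: the state is (green block ++ non-green block, length of green block)
theorem foldl_pvGreenStep (xs g n : List (List (String × String))) :
    xs.foldl pvGreenStep (g ++ n, (g.length : Int)) =
      ((g ++ xs.filter (fun c => pvIsGreen c)) ++ (n ++ xs.filter (fun c => !pvIsGreen c)),
       ((g ++ xs.filter (fun c => pvIsGreen c)).length : Int)) := by
  induction xs generalizing g n with
  | nil => simp
  | cons x xs ih =>
    rw [List.foldl_cons]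
    by_cases hx : pvIsGreen x = true
    · have : pvGreenStep (g ++ n, (g.length : Int)) x
          = ((g ++ [x]) ++ n, ((g ++ [x]).length : Int)) := by
        unfold pvGreenStep
        rw [pvStep_test_eq, hx]
        simp [insert_split]
      rw [this, ih (g ++ [x]) n]
      simp [hx]
    · have hx' : pvIsGreen x = false := by simpa using hx
      have : pvGreenStep (g ++ n, (g.length : Int)) x
          = (g ++ (n ++ [x]), (g.length : Int)) := by
        unfold pvGreenStep
        rw [pvStep_test_eq, hx']
        simp
      rw [this, ih g (n ++ [x])]
      simp [hx']

theorem alt_loop_eq_partition (xs : List (List (String × String))) :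
    (xs.foldl pvGreenStep ([], 0)).1 =
      xs.filter (fun c => pvIsGreen c) ++ xs.filter (fun c => !pvIsGreen c) := by
  simpa using congrArg Prod.fst (foldl_pvGreenStep xs [] [])

-- membership in the green sublist is the green test, for list elements
theorem contains_green_iff (candidates : List (List (String × String)))
    (c : List (String × String)) (hc : c ∈ candidates) :
    (candidates.filter (fun x => pvIsGreen x)).contains c = pvIsGreen c := by
  by_cases h : pvIsGreen c = true
  · simp [List.mem_filter, hc, h]
  · have h' : pvIsGreen c = false := by simpa using h
    simp [List.mem_filter, h']

-- ===== VERDICT (by name: the statement is the Claim_ definition above) =====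
theorem prefer_green_node_spec : Claim_equal_prefer_green_node := by
  intro candidates strategy _
  unfold Spec_prefer_green_node prefer_green_node prefer_green_node_alt
  by_cases hs : strategy == "speed"
  · simp [hs]
  · simp only [hs, if_false, Bool.false_eq_true]
    rw [alt_loop_eq_partition]
    have hng : candidates.filter (fun c => !(candidates.filter (fun x => pvIsGreen x)).contains c)
        = candidates.filter (fun c => !pvIsGreen c) := by
      apply List.filter_congr
      intro c hc
      rw [contains_green_iff candidates c hc]
    by_cases hempty : (candidates.filter (fun c => pvIsGreen c)).isEmpty
    · have h0 : candidates.filter (fun c => pvIsGreen c) = [] := by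
        simpa [List.isEmpty_iff] using hempty
      have hall : candidates.filter (fun c => !pvIsGreen c) = candidates := by
        apply List.filter_eq_self.2
        intro a ha
        have : pvIsGreen a = false := by
          by_contra h
          have : a ∈ candidates.filter (fun c => pvIsGreen c) := by
            simp [List.mem_filter, ha]; simpa using h
          simp [h0] at this
        simp [this]
      simp [h0, hall]
    · simp only [hempty, if_false, Bool.false_eq_true]
      rw [hng]
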